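-- pv_equiv track=rewrite | github.com/CandidCypher/PythonPractice | Data_structures/Arrays/Assignments/Second_best_score.py | find_second_best_no_max
-- ===== SOURCE A (Python) =====
-- def find_second_best_no_max(arr:list)->tuple:
--     """
--     Info: Funcion that finds the first and second highest
--     """
--     highest, second_best = 0, 0
--     for score in arr:
--         if score > highest:
--             second_best = highest
--             highest = score
--         elif ((score > second_best) and score != highest):
--             second_best = score
--     return highest, second_best
-- ===== SOURCE B (Python) =====
-- def find_second_best_no_max(arr: list) -> tuple:
--     highest = max([0] + arr)
--     second_best = max([0] + [x for x in arr if x < highest])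
--     return highest, second_best
-- ===== Notes on version B (the rewrite author's own statement) =====
-- stated objective: simpler
-- what changed: Replaced A's single stateful guarded loop (tracking highest/second_best with conditional demotion) by two builtin max reductions: the highest of the zero-seeded list, then the max of the zero-seeded strict-less-than filter.
import Mathlib
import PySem

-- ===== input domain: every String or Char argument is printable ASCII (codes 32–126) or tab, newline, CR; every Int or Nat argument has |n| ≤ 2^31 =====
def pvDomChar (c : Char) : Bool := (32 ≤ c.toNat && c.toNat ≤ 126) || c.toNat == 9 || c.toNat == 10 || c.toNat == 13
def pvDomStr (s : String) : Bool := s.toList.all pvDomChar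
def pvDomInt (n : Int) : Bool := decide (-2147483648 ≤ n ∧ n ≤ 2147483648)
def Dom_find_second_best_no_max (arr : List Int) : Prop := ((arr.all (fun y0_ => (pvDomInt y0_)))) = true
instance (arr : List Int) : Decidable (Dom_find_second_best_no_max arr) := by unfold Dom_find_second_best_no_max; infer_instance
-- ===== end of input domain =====

-- B computes the same pair with two max-reductions (max of 0::arr, then max of the values strictly below it) instead of A's guarded accumulating loop; objective: simpler.


-- ===== PORT A =====
-- one loop iteration of A: state (highest, second_best)
def pvStepA (st : Int × Int) (score : Int) : Int × Int :=
  if score > st.1 then (score, st.1)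
  else if score > st.2 ∧ score ≠ st.1 then (st.1, score)
  else st

def find_second_best_no_max (arr : List Int) : Int × Int :=
  List.foldl pvStepA (0, 0) arr

-- ===== PORT B =====
-- max([0]+l) on the always-nonempty list 0::l; .getD 0 is unreachable (max? of a cons is some)
def pvMax0 (l : List Int) : Int :=
  (PySem.List.max? ((0 : Int) :: l) (fun y => y)).getD 0

def find_second_best_no_max_alt (arr : List Int) : Int × Int :=
  let highest := pvMax0 arr
  let second_best := pvMax0 (arr.filter (fun x => decide (x < highest)))
  (highest, second_best)

-- ===== PRECONDITION & SPEC =====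
def Spec_find_second_best_no_max (arr : List Int) (out : Int × Int) : Prop := out = find_second_best_no_max_alt arr
instance (arr : List Int) (out : Int × Int) : Decidable (Spec_find_second_best_no_max arr out) := by unfold Spec_find_second_best_no_max; infer_instance

-- ===== CLAIM (what is proved, stated in full; the proofs are below) =====
def Claim_equal_find_second_best_no_max : Prop := ∀ (arr : List Int), Dom_find_second_best_no_max arr → Spec_find_second_best_no_max arr (find_second_best_no_max arr)

-- ===== LEMMAS AND PROOFS =====

theorem pvMax0_eq_foldl (l : List Int) : pvMax0 l = List.foldl max 0 l := by
  simp [pvMax0, PySem.List.max?_id_cons]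

theorem foldl_max_shift (l : List Int) : ∀ (a b : Int),
    List.foldl max (max a b) l = max a (List.foldl max b l) := by
  induction l with
  | nil => intro a b; rfl
  | cons x t ih =>
      intro a b
      simp only [List.foldl]
      rw [max_assoc, ih]

theorem foldl_max_cons (l : List Int) (b x : Int) :
    List.foldl max b (x :: l) = max x (List.foldl max b l) := by
  simp only [List.foldl]
  rw [max_comm b x, foldl_max_shift]

theorem le_foldl_max (l : List Int) (b : Int) : b ≤ List.foldl max b l := by
  have := foldl_max_shift l b b
  simp only [max_self] at this
  omega

theorem foldl_max_base (l : List Int) (a b : Int) (h : b ≤ a) :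
    List.foldl max a l = max a (List.foldl max b l) := by
  rw [← foldl_max_shift, max_eq_left h]

-- invariant: from a state (h, sb) with sb ≤ h, A's loop over l yields
-- (H, max of sb and the elements of h::l strictly below H) where H = foldl max h l
theorem stepA_invariant (l : List Int) : ∀ (h sb : Int), sb ≤ h →
    List.foldl pvStepA (h, sb) l =
      (List.foldl max h l,
       List.foldl max sb ((h :: l).filter (fun x => decide (x < List.foldl max h l)))) := by
  induction l with
  | nil =>
      intro h sb hle
      simp only [List.foldl, List.filter_cons, decide_eq_true_eq, lt_self_iff_false,
        if_false, List.filter_nil]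
  | cons a t ih =>
      intro h sb hle
      simp only [List.foldl, pvStepA]
      by_cases h1 : a > h
      · -- new maximum: state becomes (a, h)
        simp only [if_pos h1]
        rw [ih a h (le_of_lt h1)]
        have hH : List.foldl max (max h a) t = List.foldl max a t := by
          rw [max_eq_right (le_of_lt h1)]
        rw [Prod.mk.injEq]
        refine ⟨hH.symm, ?_⟩
        simp only [hH]
        have hhlt : h < List.foldl max a t := lt_of_lt_of_le h1 (le_foldl_max t a)
        simp only [List.filter_cons, decide_eq_true_eq, if_pos hhlt]
        rw [foldl_max_cons, foldl_max_base _ h sb hle]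
      · simp only [if_neg h1]
        have hah : a ≤ h := by omega
        have hHeq : List.foldl max (max h a) t = List.foldl max h t := by
          rw [max_eq_left hah]
        by_cases h2 : a > sb ∧ a ≠ h
        · -- new second best: state becomes (h, a)
          simp only [if_pos h2]
          rw [ih h a (by omega)]
          have halt : a < h := lt_of_le_of_ne hah h2.2
          rw [Prod.mk.injEq]
          refine ⟨hHeq.symm, ?_⟩
          simp only [hHeq]
          have haH : a < List.foldl max h t := lt_of_lt_of_le halt (le_foldl_max t h)
          simp only [List.filter_cons, decide_eq_true_eq, if_pos haH]
          by_cases h3 : h < List.foldl max h t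
          · simp only [if_pos h3]
            rw [foldl_max_cons, foldl_max_cons, foldl_max_cons,
              foldl_max_base _ a sb (le_of_lt h2.1)]
          · simp only [if_neg h3]
            rw [foldl_max_cons, foldl_max_base _ a sb (le_of_lt h2.1)]
        · -- state unchanged
          simp only [if_neg h2]
          rw [ih h sb hle]
          rw [Prod.mk.injEq]
          refine ⟨hHeq.symm, ?_⟩
          simp only [hHeq]
          simp only [List.filter_cons, decide_eq_true_eq]
          by_cases h4 : a < List.foldl max h t
          · simp only [if_pos h4]
            have hsbX : sb ≤ List.foldl max sb (List.filter
                (fun x => decide (x < List.foldl max h t)) t) := le_foldl_max _ sb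
            rcases not_and_or.mp h2 with hc | hc
            · -- a ≤ sb: a is absorbed
              have hasb : a ≤ sb := by omega
              by_cases h3 : h < List.foldl max h t
              · simp only [if_pos h3]
                rw [foldl_max_cons, foldl_max_cons, foldl_max_cons]
                generalize List.foldl max sb _ = X at hsbX ⊢
                simp only [max_def]
                split_ifs <;> omega
              · simp only [if_neg h3]
                rw [foldl_max_cons]
                generalize List.foldl max sb _ = X at hsbX ⊢
                simp only [max_def]
                split_ifs <;> omega
            · -- a = h: duplicate of the current highest, absorbed
              have hae : a = h := not_not.mp (by simpa using hc)
              have h3 : h < List.foldl max h t := by omega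
              simp only [if_pos h3]
              rw [foldl_max_cons, foldl_max_cons, foldl_max_cons]
              generalize List.foldl max sb _ = X
              simp only [max_def]
              split_ifs <;> omega
          · simp only [if_neg h4]

-- ===== VERDICT (by name: the statement is the Claim_ definition above) =====
theorem find_second_best_no_max_spec : Claim_equal_find_second_best_no_max := by
  intro arr _
  unfold Spec_find_second_best_no_max find_second_best_no_max find_second_best_no_max_alt
  rw [stepA_invariant arr 0 0 le_rfl]
  simp only [pvMax0_eq_foldl, List.filter_cons, decide_eq_true_eq]
  by_cases hz : (0:Int) < List.foldl max 0 arr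
  · simp only [if_pos hz, List.foldl, max_self]
  · simp only [if_neg hz]
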